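-- pv_equiv track=rewrite | github.com/icarusicarus/Algorithm | Hackerrank/qq2.py | getSubstringCount
-- ===== SOURCE A (Python) =====
-- def getSubstringCount(s):
--     # Write your code here
--     count_list = []
--     cnt = 1
--     for i in range(1, len(s)):
--         if s[i - 1] == s[i]:
--             cnt += 1
--         else:
--             count_list.append(cnt)
--             cnt = 1
--     count_list.append(cnt)
--
--     result = 0
--     for i in range(1, len(count_list)):
--         result += min(count_list[i - 1], count_list[i])
--
--     return result
-- ===== SOURCE B (Python) =====
-- def getSubstringCount(s):
--     # Center expansion: for each adjacent unequal pair, expand outward counting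
--     # matching offsets (each offset is one counted substring); no run lengths kept.
--     n = len(s)
--     result = 0
--     for i in range(1, n):
--         if s[i - 1] != s[i]:
--             j = 1
--             while i - 1 - j >= 0 and i + j < n and s[i - 1 - j] == s[i - 1] and s[i + j] == s[i]:
--                 j += 1
--             result += j
--     return result
-- ===== Notes on version B (the rewrite author's own statement) =====
-- stated objective: alternative
-- what changed: Replaces run-length encoding plus adjacent-minimum summation by center expansion: at every unequal adjacent pair it expands outward while both sides keep matching, counting each matching offset (i.e. each c^k d^k substring) individually; no run-length list or run counters are maintained.
import Mathlib
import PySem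

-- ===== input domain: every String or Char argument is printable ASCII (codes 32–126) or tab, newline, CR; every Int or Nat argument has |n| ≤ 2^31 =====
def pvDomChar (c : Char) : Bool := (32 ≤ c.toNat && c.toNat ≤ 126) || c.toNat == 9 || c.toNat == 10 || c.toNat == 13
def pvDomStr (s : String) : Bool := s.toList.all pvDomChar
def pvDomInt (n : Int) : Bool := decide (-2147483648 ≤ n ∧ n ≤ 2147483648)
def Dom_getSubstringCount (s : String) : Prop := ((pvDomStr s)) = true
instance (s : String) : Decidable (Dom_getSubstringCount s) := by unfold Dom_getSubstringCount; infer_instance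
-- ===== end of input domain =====

-- B replaces run-length encoding + adjacent-minimum summation by center expansion around each
-- unequal adjacent pair (objective: alternative algorithm, same return value).


-- ===== PORT A =====
-- first loop: walk the chars comparing each to the previous one, state (count_list, cnt)
def pvLoopA1 : Char → List Char → List Int → Int → List Int × Int
  | _, [], cl, cnt => (cl, cnt)
  | p, c :: rest, cl, cnt =>
    if p == c then pvLoopA1 c rest cl (cnt + 1)
    else pvLoopA1 c rest (cl ++ [cnt]) 1

-- second loop: result += min(count_list[i-1], count_list[i])
def pvLoopA2 : Int → List Int → Int → Int
  | _, [], acc => acc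
  | p, x :: rest, acc => pvLoopA2 x rest (acc + min p x)

def getSubstringCount (s : String) : Int :=
  let st : List Int × Int :=
    match s.toList with
    | [] => ([], 1)
    | c :: rest => pvLoopA1 c rest [] 1
  let count_list := st.1 ++ [st.2]
  match count_list with
  | [] => 0
  | x :: rest => pvLoopA2 x rest 0

-- ===== PORT B =====
-- B's inner while loop: expand offset j outward while both sides keep matching
def pvWhileB (cs : List Char) (i : Nat) (j : Nat) : Nat :=
  if h : j + 1 ≤ i ∧ i + j < cs.length ∧ cs.getD (i - 1 - j) ' ' = cs.getD (i - 1) ' '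
        ∧ cs.getD (i + j) ' ' = cs.getD i ' '
  then pvWhileB cs i (j + 1) else j
termination_by cs.length - (i + j)
decreasing_by obtain ⟨-, h2, -, -⟩ := h; omega

def getSubstringCount_alt (s : String) : Int :=
  let cs := s.toList
  (List.range' 1 (cs.length - 1)).foldl
    (fun res i => if cs.getD (i - 1) ' ' ≠ cs.getD i ' ' then res + (pvWhileB cs i 1 : Int) else res) 0

-- ===== PRECONDITION & SPEC =====
def Spec_getSubstringCount (s : String) (out : Int) : Prop := out = getSubstringCount_alt s
instance (s : String) (out : Int) : Decidable (Spec_getSubstringCount s out) := by unfold Spec_getSubstringCount; infer_instance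

-- ===== CLAIM (what is proved, stated in full; the proofs are below) =====
def Claim_equal_getSubstringCount : Prop := ∀ (s : String), Dom_getSubstringCount s → Spec_getSubstringCount s (getSubstringCount s)

-- ===== LEMMAS AND PROOFS =====

-- reference value: structural recursion over the run decomposition
def pvRef : List Char → Int
  | [] => 0
  | c :: t =>
    match h : t.dropWhile (· == c) with
    | [] => 0
    | d :: ds =>
      min (1 + ((t.takeWhile (· == c)).length : Int)) (1 + ((ds.takeWhile (· == d)).length : Int))
        + pvRef (d :: ds)
termination_by l => l.length
decreasing_by
  have := List.length_dropWhile_le (· == c) t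
  simp only [h, List.length_cons] at this
  simp only [List.length_cons]
  omega

-- the count_list A's first loop produces, as a pure function
def pvCL : Char → List Char → Int → List Int
  | _, [], cnt => [cnt]
  | p, c :: cs, cnt => if p == c then pvCL c cs (cnt + 1) else cnt :: pvCL c cs 1

-- A's second loop, started at 0, as a function of the list
def pvAdj : List Int → Int
  | a :: b :: r => min a b + pvAdj (b :: r)
  | _ => 0

-- B's loop-body contribution at index i
def pvContrib (cs : List Char) (i : Nat) : Int :=
  if cs.getD (i - 1) ' ' ≠ cs.getD i ' ' then (pvWhileB cs i 1 : Int) else 0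

def pvSB (cs : List Char) : Int := ((List.range' 1 (cs.length - 1)).map (pvContrib cs)).sum

theorem pvLoopA1_cl : ∀ (rest : List Char) (p : Char) (cl : List Int) (cnt : Int),
    (pvLoopA1 p rest cl cnt).1 ++ [(pvLoopA1 p rest cl cnt).2] = cl ++ pvCL p rest cnt := by
  intro rest
  induction rest with
  | nil => intro p cl cnt; simp [pvLoopA1, pvCL]
  | cons c cs ih =>
    intro p cl cnt
    simp only [pvLoopA1, pvCL]
    by_cases h : p == c
    · simp only [h, if_true]; exact ih c cl (cnt + 1)
    · simp only [h, if_false, Bool.false_eq_true]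
      rw [ih c (cl ++ [cnt]) 1]
      simp

theorem pvLoopA2_adj : ∀ (xs : List Int) (x acc : Int), pvLoopA2 x xs acc = acc + pvAdj (x :: xs) := by
  intro xs
  induction xs with
  | nil => intro x acc; simp [pvLoopA2, pvAdj]
  | cons y ys ih =>
    intro x acc
    simp only [pvLoopA2, pvAdj]
    rw [ih y (acc + min x y)]
    ring

theorem pvCL_run : ∀ (rest : List Char) (c : Char) (cnt : Int),
    pvCL c rest cnt = (cnt + ((rest.takeWhile (· == c)).length : Int)) ::
      (match rest.dropWhile (· == c) with | [] => [] | d :: ds => pvCL d ds 1) := by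
  intro rest
  induction rest with
  | nil => intro c cnt; simp [pvCL]
  | cons e es ih =>
    intro c cnt
    simp only [pvCL, List.takeWhile, List.dropWhile]
    by_cases h : e == c
    · have he : e = c := by simpa using h
      subst he
      simp only [h, if_true]
      have h' : (e == e) = true := by simp
      rw [ih e (cnt + 1)]
      simp only [List.length_cons]
      congr 1
      push_cast
      ring
    · have h' : (e == c) = false := by simpa using h
      have h'' : (c == e) = false := by
        simp only [beq_eq_false_iff_ne] at h' ⊢; exact fun hc => h' hc.symm
      simp only [h', h'', if_false, Bool.false_eq_true, List.length_nil]
      simp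

theorem pvCL_run_nil {rest : List Char} {c : Char} {cnt : Int} (hd : rest.dropWhile (· == c) = []) :
    pvCL c rest cnt = [cnt + ((rest.takeWhile (· == c)).length : Int)] := by
  rw [pvCL_run rest c cnt, hd]

theorem pvCL_run_cons {rest : List Char} {c : Char} {cnt : Int} {d : Char} {ds : List Char}
    (hd : rest.dropWhile (· == c) = d :: ds) :
    pvCL c rest cnt = (cnt + ((rest.takeWhile (· == c)).length : Int)) :: pvCL d ds 1 := by
  rw [pvCL_run rest c cnt, hd]

theorem pvRef_nil_run {c : Char} {t : List Char} (hd : t.dropWhile (· == c) = []) :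
    pvRef (c :: t) = 0 := by
  rw [pvRef]
  split <;> simp_all

theorem pvRef_cons_run {c d : Char} {t ds : List Char} (hd : t.dropWhile (· == c) = d :: ds) :
    pvRef (c :: t) = min (1 + ((t.takeWhile (· == c)).length : Int)) (1 + ((ds.takeWhile (· == d)).length : Int)) + pvRef (d :: ds) := by
  rw [pvRef]
  split <;> simp_all

theorem pvAdj_cl_ref : ∀ (n : Nat) (c : Char) (rest : List Char), rest.length ≤ n →
    pvAdj (pvCL c rest 1) = pvRef (c :: rest) := by
  intro n
  induction n with
  | zero =>
    intro c rest h
    have hr : rest = [] := List.length_eq_zero_iff.mp (Nat.le_zero.mp h)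
    subst hr
    rw [pvRef_nil_run (by simp)]
    simp [pvCL, pvAdj]
  | succ n ih =>
    intro c rest h
    cases hd : rest.dropWhile (· == c) with
    | nil => rw [pvRef_nil_run hd, pvCL_run_nil hd]; simp [pvAdj]
    | cons d ds =>
      have hlen : ds.length ≤ n := by
        have := List.length_dropWhile_le (· == c) rest
        rw [hd] at this
        simp only [List.length_cons] at this
        omega
      rw [pvRef_cons_run hd, ← ih d ds hlen, pvCL_run_cons hd]
      cases hd2 : ds.dropWhile (· == d) with
      | nil => rw [pvCL_run_nil hd2]; simp [pvAdj]
      | cons e es => rw [pvCL_run_cons hd2]; simp only [pvAdj]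

theorem A_eq_ref (s : String) : getSubstringCount s = pvRef s.toList := by
  cases hs : s.toList with
  | nil =>
    simp only [getSubstringCount, hs]
    simp [pvLoopA2, pvRef]
  | cons c rest =>
    simp only [getSubstringCount, hs]
    have hcl := pvLoopA1_cl rest c [] 1
    rw [List.nil_append] at hcl
    rw [hcl]
    have hrun := pvCL_run rest c 1
    cases hL : pvCL c rest 1 with
    | nil => rw [hL] at hrun; simp at hrun
    | cons x xs =>
      show pvLoopA2 x xs 0 = pvRef (c :: rest)
      rw [pvLoopA2_adj, ← hL, pvAdj_cl_ref rest.length c rest (le_refl _), zero_add]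

theorem getD_repl_left {k i : Nat} (c x : Char) (t : List Char) (h : i < k) :
    (List.replicate k c ++ t).getD i x = c := by
  rw [List.getD_append _ _ _ _ (by simpa using Nat.lt_of_lt_of_le h (le_refl k))]
  · exact List.getD_replicate c h

theorem getD_repl_right (k : Nat) (c x : Char) (t : List Char) (i : Nat) :
    (List.replicate k c ++ t).getD (k + i) x = t.getD i x := by
  rw [List.getD_append_right _ _ _ _ (by simp)]
  simp

-- expansion at the boundary between the first two runs gives min of their lengths

theorem getD_mid {k b : Nat} (c d x : Char) (tail : List Char) (_hb : 1 ≤ b) {j : Nat} (hj : j < b) :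
    (List.replicate k c ++ (List.replicate b d ++ tail)).getD (k + j) x = d := by
  rw [getD_repl_right, List.getD_append _ _ _ _ (by simpa using hj)]
  exact List.getD_replicate d hj

theorem pvWhileB_mid : ∀ (m k b : Nat) (c d : Char) (tail : List Char),
    1 ≤ k → 1 ≤ b → (tail ≠ [] → tail.getD 0 ' ' ≠ d) →
    ∀ j, 1 ≤ j → j ≤ min k b → min k b - j = m →
    pvWhileB (List.replicate k c ++ (List.replicate b d ++ tail)) k j = min k b := by
  intro m
  induction m with
  | zero =>
    intro k b c d tail hk hb htail j hj1 hjle hm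
    have hj : j = min k b := by omega
    subst hj
    rw [pvWhileB, dif_neg]
    intro hcond
    obtain ⟨h1, h2, h3, h4⟩ := hcond
    have hbk : min k b = b ∧ b < k := by omega
    rw [List.length_append, List.length_append, List.length_replicate, List.length_replicate] at h2
    have htl : tail ≠ [] := by
      intro he; subst he; simp at h2; omega
    have e1 : (List.replicate k c ++ (List.replicate b d ++ tail)).getD k ' ' = d := by
      have := getD_mid (k := k) (b := b) c d ' ' tail hb (j := 0) (by omega)
      simpa using this
    have e2 : (List.replicate k c ++ (List.replicate b d ++ tail)).getD (k + min k b) ' ' = tail.getD 0 ' ' := by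
      rw [getD_repl_right, hbk.1, List.getD_append_right _ _ _ _ (by simp)]
      simp
    rw [e1, e2] at h4
    exact htail htl h4
  | succ m ih =>
    intro k b c d tail hk hb htail j hj1 hjle hm
    have hjlt : j < min k b := by omega
    rw [pvWhileB, dif_pos]
    · exact ih k b c d tail hk hb htail (j + 1) (by omega) (by omega) (by omega)
    · refine ⟨by omega, ?_, ?_, ?_⟩
      · rw [List.length_append, List.length_append, List.length_replicate, List.length_replicate]
        omega
      · rw [getD_repl_left c ' ' _ (show k - 1 - j < k by omega),
            getD_repl_left c ' ' _ (show k - 1 < k by omega)]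
      · rw [getD_mid c d ' ' tail hb (by omega)]
        have e1 : (List.replicate k c ++ (List.replicate b d ++ tail)).getD k ' ' = d := by
          have := getD_mid (k := k) (b := b) c d ' ' tail hb (j := 0) (by omega)
          simpa using this
        rw [e1]

theorem pvWhileB_shift : ∀ (m k : Nat) (c : Char) (rest : List Char) (i : Nat),
    1 ≤ i → i < rest.length → rest.getD 0 ' ' ≠ c →
    ∀ j, 1 ≤ j →
    (∀ t, t < j → t + 1 ≤ i → rest.getD (i - 1 - t) ' ' = rest.getD (i - 1) ' ') →
    rest.length - (i + j) = m →
    pvWhileB (List.replicate k c ++ rest) (k + i) j = pvWhileB rest i j := by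
  intro m
  induction m with
  | zero =>
    intro k c rest i hi1 hi2 h0 j hj1 hH hm
    -- i + j ≥ rest.length: right bound fails on both sides
    rw [pvWhileB, dif_neg, pvWhileB, dif_neg]
    · intro hc
      obtain ⟨-, h2, -, -⟩ := hc
      omega
    · intro hc
      obtain ⟨-, h2, -, -⟩ := hc
      rw [List.length_append, List.length_replicate] at h2
      omega
  | succ m ih =>
    intro k c rest i hi1 hi2 h0 j hj1 hH hm
    have hR : i + j < rest.length := by omega
    have eR1 : (List.replicate k c ++ rest).getD (k + i + j) ' ' = rest.getD (i + j) ' ' := by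
      rw [Nat.add_assoc, getD_repl_right]
    have eR0 : (List.replicate k c ++ rest).getD (k + i) ' ' = rest.getD i ' ' := by
      rw [getD_repl_right]
    have eL0 : (List.replicate k c ++ rest).getD (k + i - 1) ' ' = rest.getD (i - 1) ' ' := by
      rw [show k + i - 1 = k + (i - 1) by omega, getD_repl_right]
    by_cases hstep : j + 1 ≤ i
    · -- left index stays inside rest on both sides; conditions coincide
      have eL : (List.replicate k c ++ rest).getD (k + i - 1 - j) ' ' = rest.getD (i - 1 - j) ' ' := by
        rw [show k + i - 1 - j = k + (i - 1 - j) by omega, getD_repl_right]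
      by_cases hcr : rest.getD (i - 1 - j) ' ' = rest.getD (i - 1) ' ' ∧ rest.getD (i + j) ' ' = rest.getD i ' '
      · rw [pvWhileB, dif_pos ⟨by omega,
              by rw [List.length_append, List.length_replicate]; omega,
              eL.trans (hcr.1.trans eL0.symm),
              eR1.trans (hcr.2.trans eR0.symm)⟩]
        conv_rhs => rw [pvWhileB, dif_pos ⟨by omega, hR, hcr.1, hcr.2⟩]
        -- hmm: LHS after dif_pos is pvWhileB (repl ++ rest) (k+i) (j+1): need to rewrite its getD conds... no, recursion direct
        exact ih k c rest i hi1 hi2 h0 (j + 1) (by omega)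
          (by
            intro t ht hti
            rcases Nat.lt_succ_iff_lt_or_eq.mp ht with h | h
            · exact hH t h hti
            · subst h; exact hcr.1)
          (by omega)
      · rw [pvWhileB, dif_neg, pvWhileB, dif_neg]
        · intro hc
          exact hcr ⟨hc.2.2.1, hc.2.2.2⟩
        · intro hc
          obtain ⟨-, -, hc3, hc4⟩ := hc
          rw [show k + i - 1 - j = k + (i - 1 - j) by omega, getD_repl_right] at hc3
          rw [eL0] at hc3
          rw [eR1, eR0] at hc4
          exact hcr ⟨hc3, hc4⟩
    · -- j ≥ i : rest side stops on the bound; l side stops because the leading run's char differs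
      rw [pvWhileB, dif_neg, pvWhileB, dif_neg]
      · intro hc
        exact hstep hc.1
      · intro hc
        obtain ⟨hc1, -, hc3, -⟩ := hc
        -- left index falls into the replicate block
        have hidx : k + i - 1 - j < k := by omega
        rw [getD_repl_left c ' ' _ hidx, eL0] at hc3
        -- hH at t = i - 1 gives rest[0] = rest[i-1]
        have h00 : rest.getD 0 ' ' = rest.getD (i - 1) ' ' := by
          have := hH (i - 1) (by omega) (by omega)
          simpa [show i - 1 - (i - 1) = 0 by omega] using this
        exact h0 (by rw [h00, ← hc3])

theorem dropWhile_head_false {p : Char → Bool} : ∀ (t : List Char) {d : Char} {ds : List Char},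
    t.dropWhile p = d :: ds → p d = false := by
  intro t
  induction t with
  | nil => intro d ds h; cases h
  | cons a t ih =>
    intro d ds h
    rw [List.dropWhile_cons] at h
    by_cases ha : p a
    · rw [if_pos ha] at h; exact ih h
    · rw [if_neg ha] at h; cases h; simpa using ha

theorem dropWhile_getD_ne {t : List Char} {c : Char} (h : t.dropWhile (· == c) ≠ []) :
    (t.dropWhile (· == c)).getD 0 ' ' ≠ c := by
  cases he : t.dropWhile (· == c) with
  | nil => exact absurd he h
  | cons e es =>
    have := dropWhile_head_false t he
    simpa using this

theorem repl_split {c : Char} {t : List Char} :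
    c :: t = List.replicate ((t.takeWhile (· == c)).length + 1) c ++ t.dropWhile (· == c) := by
  have h1 : t.takeWhile (· == c) = List.replicate (t.takeWhile (· == c)).length c := by
    rw [List.eq_replicate_iff]
    exact ⟨rfl, fun b hb => by simpa using List.mem_takeWhile_imp hb⟩
  calc c :: t = c :: (t.takeWhile (· == c) ++ t.dropWhile (· == c)) := by
        rw [List.takeWhile_append_dropWhile]
    _ = (c :: t.takeWhile (· == c)) ++ t.dropWhile (· == c) := rfl
    _ = _ := by rw [List.replicate_succ, ← h1]

theorem B_eq_ref : ∀ (n : Nat) (l : List Char), l.length ≤ n → pvSB l = pvRef l := by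
  intro n
  induction n with
  | zero =>
    intro l h
    have hl : l = [] := List.length_eq_zero_iff.mp (Nat.le_zero.mp h)
    subst hl
    simp [pvSB, pvRef]
  | succ n ih =>
    intro l hlen
    cases l with
    | nil => simp [pvSB, pvRef]
    | cons c t =>
      cases hd : t.dropWhile (· == c) with
      | nil =>
        rw [pvRef_nil_run hd]
        have hsp := repl_split (c := c) (t := t)
        rw [hd, List.append_nil] at hsp
        apply List.sum_eq_zero
        intro y hy
        obtain ⟨i, hi, rfl⟩ := List.mem_map.mp hy
        obtain ⟨hi1, hi2⟩ := List.mem_range'_1.mp hi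
        have hlen1 : (c :: t).length = (t.takeWhile (· == c)).length + 1 := by
          rw [hsp]; simp
        simp only [List.length_cons] at hi2 hlen1
        unfold pvContrib
        rw [if_neg]
        exact not_not.mpr (by
          rw [hsp, List.getD_replicate c (by omega), List.getD_replicate c (by omega)])
      | cons d ds =>
        set k := (t.takeWhile (· == c)).length + 1 with hk
        set b := (ds.takeWhile (· == d)).length + 1 with hb
        have hsp : c :: t = List.replicate k c ++ (d :: ds) := by
          rw [repl_split (c := c) (t := t), hd]
        have hsp2 : d :: ds = List.replicate b d ++ ds.dropWhile (· == d) := by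
          exact repl_split (c := d) (t := ds)
        have hdc : d ≠ c := by
          have := dropWhile_head_false t hd
          simp at this
          exact this
        have hlen2 : (c :: t).length = k + (d :: ds).length := by rw [hsp]; simp
        have hkb1 : 1 ≤ k := by omega
        have hbb1 : 1 ≤ b := by omega
        have hr : List.range' 1 ((c :: t).length - 1)
            = (List.range' 1 (k - 1) ++ [k]) ++ List.range' (k + 1) ((d :: ds).length - 1) := by
          have e1 : List.range' 1 (k - 1) ++ [k] = List.range' 1 k := by
            have h0 := List.range'_concat (step := 1) (s := 1) (n := k - 1)
            rw [show (k - 1) + 1 = k by omega] at h0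
            rw [h0, show 1 + 1 * (k - 1) = k by omega]
          have e2 := List.range'_append (s := 1) (m := k) (n := (d :: ds).length - 1) (step := 1)
          rw [show 1 + 1 * k = k + 1 by omega] at e2
          rw [e1, e2, hlen2]
          congr 1
        have hz : ((List.range' 1 (k - 1)).map (pvContrib (c :: t))).sum = 0 := by
          apply List.sum_eq_zero
          intro y hy
          obtain ⟨i, hi, rfl⟩ := List.mem_map.mp hy
          obtain ⟨hi1, hi2⟩ := List.mem_range'_1.mp hi
          unfold pvContrib
          rw [if_neg]
          exact not_not.mpr (by
            rw [hsp, getD_repl_left c ' ' _ (by omega), getD_repl_left c ' ' _ (by omega)])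
        have hmid : pvContrib (c :: t) k = ((min k b : Nat) : Int) := by
          unfold pvContrib
          have g1 : (c :: t).getD (k - 1) ' ' = c := by
            rw [hsp]; exact getD_repl_left c ' ' _ (by omega)
          have g2 : (c :: t).getD k ' ' = d := by
            rw [hsp]
            have h0 := getD_repl_right k c ' ' (d :: ds) 0
            simpa using h0
          rw [g1, g2, if_pos (fun h => hdc h.symm)]
          congr 1
          rw [hsp, hsp2]
          exact pvWhileB_mid (min k b - 1) k b c d _ hkb1 hbb1
            (fun hne => dropWhile_getD_ne hne) 1 (by omega) (by omega) rfl
        have hshift : ((List.range' (k + 1) ((d :: ds).length - 1)).map (pvContrib (c :: t))).sum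
            = pvSB (d :: ds) := by
          unfold pvSB
          rw [List.range'_eq_map_range, List.range'_eq_map_range, List.map_map, List.map_map]
          apply congrArg List.sum
          apply List.map_congr_left
          intro x hx
          have hx' : x < (d :: ds).length - 1 := List.mem_range.mp hx
          simp only [Function.comp_apply]
          rw [show k + 1 + x = k + (1 + x) by omega]
          unfold pvContrib
          have hE0 : (c :: t).getD (k + (1 + x) - 1) ' ' = (d :: ds).getD (1 + x - 1) ' ' := by
            rw [hsp, show k + (1 + x) - 1 = k + x by omega, getD_repl_right]
            congr 1
            omega
          have hE1 : (c :: t).getD (k + (1 + x)) ' ' = (d :: ds).getD (1 + x) ' ' := by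
            rw [hsp, getD_repl_right]
          rw [hE0, hE1]
          by_cases hne : (d :: ds).getD (1 + x - 1) ' ' ≠ (d :: ds).getD (1 + x) ' '
          · rw [if_pos hne, if_pos hne]
            have hsw := pvWhileB_shift ((d :: ds).length - (1 + x + 1)) k c (d :: ds) (1 + x)
              (by omega) (by simp only [List.length_cons] at hx' ⊢; omega) (by simpa using hdc) 1 (by omega)
              (by
                intro t' ht' hti
                have ht0 : t' = 0 := by omega
                subst ht0
                simp) rfl
            rw [hsp, hsw]
          · rw [if_neg hne, if_neg hne]
        have hrec : pvSB (d :: ds) = pvRef (d :: ds) := by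
          apply ih
          have h1 := List.length_dropWhile_le (· == c) t
          rw [hd] at h1
          simp only [List.length_cons] at hlen h1 ⊢
          omega
        unfold pvSB
        rw [hr]
        simp only [List.map_append, List.sum_append, List.map_cons, List.map_nil, List.sum_cons,
          List.sum_nil]
        rw [hz, hmid, hshift, hrec, pvRef_cons_run hd]
        rw [Nat.cast_min]
        have hkc : (k : Int) = 1 + ((t.takeWhile (· == c)).length : Int) := by rw [hk]; push_cast; ring
        have hbc : (b : Int) = 1 + ((ds.takeWhile (· == d)).length : Int) := by rw [hb]; push_cast; ring
        rw [hkc, hbc]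
        ring

theorem B_fold (s : String) : getSubstringCount_alt s = pvSB s.toList := by
  have key : ∀ (L : List Nat) (res : Int),
      L.foldl (fun res i => if s.toList.getD (i - 1) ' ' ≠ s.toList.getD i ' '
          then res + (pvWhileB s.toList i 1 : Int) else res) res
        = res + (L.map (pvContrib s.toList)).sum := by
    intro L
    induction L with
    | nil => intro res; simp
    | cons a L ih =>
      intro res
      simp only [List.foldl_cons, List.map_cons, List.sum_cons]
      rw [ih]
      unfold pvContrib
      split_ifs <;> ring
  show (List.range' 1 (s.toList.length - 1)).foldl _ 0 = _
  rw [key, zero_add]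
  rfl

-- ===== VERDICT (by name: the statement is the Claim_ definition above) =====
theorem getSubstringCount_spec : Claim_equal_getSubstringCount := by
  intro s _
  unfold Spec_getSubstringCount
  rw [A_eq_ref, B_fold, B_eq_ref s.toList.length s.toList (le_refl _)]
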